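-- pv_equiv track=rewrite | github.com/queelius/computational-explorations | src/coprime_number_theory.py | _standard_turan
-- ===== SOURCE A (Python) =====
-- def _standard_turan(n: int, k: int) -> int:
--     """Standard Turan number ex(n, K_k) = floor((1 - 1/(k-1)) * n^2 / 2)."""
--     if k <= 1:
--         return 0
--     r = k - 1
--     # Turan graph T(n, r): partition n vertices into r classes as equally as possible
--     # Number of edges: n^2/2 * (1 - 1/r) - correction
--     q, rem = divmod(n, r)
--     edges = 0
--     sizes = [q + 1] * rem + [q] * (r - rem)
--     for i in range(r):
--         for j in range(i + 1, r):
--             edges += sizes[i] * sizes[j]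
--     return edges
-- ===== SOURCE B (Python) =====
-- def _standard_turan(n: int, k: int) -> int:
--     """Turan number ex(n, K_k): closed form from the two class sizes, O(1)."""
--     if k <= 1:
--         return 0
--     r = k - 1
--     q, rem = divmod(n, r)
--     ssq = rem * (q + 1) * (q + 1) + (r - rem) * q * q
--     return (n * n - ssq) // 2
-- ===== Notes on version B (the rewrite author's own statement) =====
-- stated objective: faster
-- what changed: Replaces the O(k^2) double loop over all class pairs by the closed form (n^2 - sum of squared class sizes)/2 computed from the two distinct class sizes.
import Mathlib
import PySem

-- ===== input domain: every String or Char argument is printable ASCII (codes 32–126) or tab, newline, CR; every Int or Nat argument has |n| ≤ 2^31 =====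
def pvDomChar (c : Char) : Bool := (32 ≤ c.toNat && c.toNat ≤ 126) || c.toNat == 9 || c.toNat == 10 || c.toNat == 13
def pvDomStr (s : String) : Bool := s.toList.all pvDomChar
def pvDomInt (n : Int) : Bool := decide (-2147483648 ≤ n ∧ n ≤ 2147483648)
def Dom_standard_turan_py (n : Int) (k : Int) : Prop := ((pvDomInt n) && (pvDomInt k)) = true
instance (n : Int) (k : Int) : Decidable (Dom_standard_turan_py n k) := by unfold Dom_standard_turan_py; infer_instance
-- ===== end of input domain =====

-- B replaces A's O(k^2) double loop over class pairs by the O(1) closed form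
-- (n^2 - sum of squared class sizes)/2 computed from the two distinct class sizes.

-- ===== PORT A =====
def standard_turan_py (n : Int) (k : Int) : Int :=
  if k ≤ 1 then 0
  else
    let r := k - 1
    let q := PySem.Int.floordiv n r
    let rem := PySem.Int.mod n r
    let sizes : List Int := List.replicate rem.toNat (q + 1) ++ List.replicate (r - rem).toNat q
    (PySem.List.pyRange 0 r 1).foldl
      (fun edges i =>
        (PySem.List.pyRange (i + 1) r 1).foldl
          (fun e j => e + PySem.List.pyGetD sizes i 0 * PySem.List.pyGetD sizes j 0) edges)
      0

-- ===== PORT B =====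
def standard_turan_py_alt (n : Int) (k : Int) : Int :=
  if k ≤ 1 then 0
  else
    let r := k - 1
    let q := PySem.Int.floordiv n r
    let rem := PySem.Int.mod n r
    let ssq := rem * (q + 1) * (q + 1) + (r - rem) * q * q
    PySem.Int.floordiv (n * n - ssq) 2

-- ===== PRECONDITION & SPEC =====
def Spec_standard_turan_py (n : Int) (k : Int) (out : Int) : Prop := out = standard_turan_py_alt n k
instance (n : Int) (k : Int) (out : Int) : Decidable (Spec_standard_turan_py n k out) := by unfold Spec_standard_turan_py; infer_instance

-- ===== CLAIM (what is proved, stated in full; the proofs are below) =====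
def Claim_equal_standard_turan_py : Prop := ∀ (n : Int) (k : Int), Dom_standard_turan_py n k → Spec_standard_turan_py n k (standard_turan_py n k)

-- ===== LEMMAS AND PROOFS =====

/-- Structural pair-sum: Σ_{i<j} xs[i]*xs[j]. -/
def pvPairs : List Int → Int
  | [] => 0
  | x :: xs => x * xs.sum + pvPairs xs

lemma pvSumIdx (xs : List Int) :
    ((List.range xs.length).map (fun m => xs.getD m 0 * (xs.drop (m + 1)).sum)).sum
      = pvPairs xs := by
  induction xs with
  | nil => simp [pvPairs]
  | cons x xs ih =>
    simp only [List.length_cons, List.range_succ_eq_map, List.map_cons, List.map_map,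
      List.sum_cons, pvPairs]
    have : ((List.range xs.length).map
        ((fun m => (x :: xs).getD m 0 * ((x :: xs).drop (m + 1)).sum) ∘ Nat.succ)).sum
        = ((List.range xs.length).map (fun m => xs.getD m 0 * (xs.drop (m + 1)).sum)).sum := by
      apply congrArg
      apply List.map_congr_left
      intro m _
      simp [Function.comp]
    rw [this, ih]
    simp

/-- A's double index loop over `pyRange` equals the structural pair-sum. -/
lemma pvFold_eq_pairs (xs : List Int) :
    (PySem.List.pyRange 0 (xs.length : Int) 1).foldl
      (fun edges i =>
        (PySem.List.pyRange (i + 1) (xs.length : Int) 1).foldl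
          (fun e j => e + PySem.List.pyGetD xs i 0 * PySem.List.pyGetD xs j 0) edges)
      0 = pvPairs xs := by
  have hinner : ∀ (acc : Int) (i : Int), i ∈ PySem.List.pyRange 0 (xs.length : Int) 1 →
      (PySem.List.pyRange (i + 1) (xs.length : Int) 1).foldl
        (fun e j => e + PySem.List.pyGetD xs i 0 * PySem.List.pyGetD xs j 0) acc
      = acc + PySem.List.pyGetD xs i 0 * (xs.drop (i + 1).toNat).sum := by
    intro acc i hi
    have h0 : (0:Int) ≤ i := ((PySem.List.mem_pyRange_one).1 hi).1
    rw [PySem.List.foldl_add (g := fun j => PySem.List.pyGetD xs i 0 * PySem.List.pyGetD xs j 0)]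
    rw [List.sum_map_mul_left, PySem.List.map_pyGetD_pyRange' xs 0 (by omega : (0:Int) ≤ i + 1)]
  rw [PySem.List.foldl_congr_mem _ _ _ _ hinner]
  rw [PySem.List.foldl_add (g := fun i => PySem.List.pyGetD xs i 0 * (xs.drop (i + 1).toNat).sum)]
  rw [zero_add]
  rw [show ((xs.length : Int)) = ((xs.length : Nat) : Int) from rfl, PySem.List.pyRange_zero_nat]
  rw [List.map_map]
  have : ((List.range xs.length).map
      ((fun i => PySem.List.pyGetD xs i 0 * (xs.drop (i + 1).toNat).sum) ∘ (fun m : Nat => (m : Int)))).sum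
      = ((List.range xs.length).map (fun m => xs.getD m 0 * (xs.drop (m + 1)).sum)).sum := by
    apply congrArg
    apply List.map_congr_left
    intro m _
    simp [Function.comp, PySem.List.pyGetD_natCast]
  rw [this, pvSumIdx]

lemma pvTwoPairs (xs : List Int) :
    2 * pvPairs xs = xs.sum * xs.sum - (xs.map (fun x => x * x)).sum := by
  induction xs with
  | nil => simp [pvPairs]
  | cons x xs ih =>
    simp only [pvPairs, List.sum_cons, List.map_cons]
    ring_nf
    ring_nf at ih
    omega

-- ===== VERDICT (by name: the statement is the Claim_ definition above) =====
theorem standard_turan_py_spec : Claim_equal_standard_turan_py := by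
  intro n k _
  unfold Spec_standard_turan_py standard_turan_py standard_turan_py_alt
  by_cases hk : k ≤ 1
  · simp [hk]
  · simp only [if_neg hk]
    set r := k - 1 with hr
    have hrpos : 0 < r := by omega
    set q := PySem.Int.floordiv n r with hq
    set rem := PySem.Int.mod n r with hrem
    have hmod : rem = n % r := by rw [hrem, PySem.Int.mod_eq_emod_of_pos hrpos]
    have hrem0 : 0 ≤ rem := by rw [hmod]; exact Int.emod_nonneg n (by omega)
    have hremr : rem < r := by rw [hmod]; exact Int.emod_lt_of_pos n hrpos
    have hn : q * r + rem = n := PySem.Int.floordiv_mul_add_mod n r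
    set sizes : List Int := List.replicate rem.toNat (q + 1) ++ List.replicate (r - rem).toNat q
      with hsz
    have hlen : (sizes.length : Int) = r := by
      simp [hsz]
      omega
    have hsum : sizes.sum = n := by
      simp [hsz, List.sum_replicate]
      rw [max_eq_left hrem0, max_eq_left (by omega : (0:Int) ≤ r - rem)]
      linear_combination hn
    have hssq : (sizes.map (fun x => x * x)).sum
        = rem * (q + 1) * (q + 1) + (r - rem) * q * q := by
      simp [hsz, List.sum_replicate]
      rw [max_eq_left hrem0, max_eq_left (by omega : (0:Int) ≤ r - rem)]
      ring
    have hA : (PySem.List.pyRange 0 r 1).foldl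
        (fun edges i =>
          (PySem.List.pyRange (i + 1) r 1).foldl
            (fun e j => e + PySem.List.pyGetD sizes i 0 * PySem.List.pyGetD sizes j 0) edges)
        0 = pvPairs sizes := by
      rw [← hlen]; exact pvFold_eq_pairs sizes
    have h2p : 2 * pvPairs sizes = n * n - (rem * (q + 1) * (q + 1) + (r - rem) * q * q) := by
      rw [pvTwoPairs, hsum, hssq]
    rw [hA]
    rw [PySem.Int.floordiv_eq_ediv_of_pos (by norm_num)]
    omega
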